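-- pv_equiv track=rewrite | github.com/LimSB-dev/BaekjoonHub | 프로그래머스/unrated/181893. 배열 조각하기/배열 조각하기.py | solution
-- ===== SOURCE A (Python) =====
-- def solution(arr, query):
--     s = e = 0
--     for index, value in enumerate(query):
--         if index % 2 == 0:
--             e = s + value
--         else:
--             s += value
--
--     return arr[s:e] if s != e else [-1]
-- ===== SOURCE B (Python) =====
-- def solution(arr, query):
--     if not query:
--         return [-1]
--     s = sum(query[1::2])
--     if len(query) % 2:
--         e = s + query[-1]
--     else:
--         e = s - query[-1] + query[-2]
--     return arr[s:e] if s != e else [-1]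
-- ===== Notes on version B (the rewrite author's own statement) =====
-- stated objective: simpler
-- what changed: Replaces the stateful enumerate loop tracking (s,e) by parity with a closed form: s = sum(query[1::2]) (a C-level slice+sum instead of a Python-level per-element loop, the constant-factor speedup) and e fixed up from the last one or two elements by the parity of len(query).
import Mathlib
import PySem

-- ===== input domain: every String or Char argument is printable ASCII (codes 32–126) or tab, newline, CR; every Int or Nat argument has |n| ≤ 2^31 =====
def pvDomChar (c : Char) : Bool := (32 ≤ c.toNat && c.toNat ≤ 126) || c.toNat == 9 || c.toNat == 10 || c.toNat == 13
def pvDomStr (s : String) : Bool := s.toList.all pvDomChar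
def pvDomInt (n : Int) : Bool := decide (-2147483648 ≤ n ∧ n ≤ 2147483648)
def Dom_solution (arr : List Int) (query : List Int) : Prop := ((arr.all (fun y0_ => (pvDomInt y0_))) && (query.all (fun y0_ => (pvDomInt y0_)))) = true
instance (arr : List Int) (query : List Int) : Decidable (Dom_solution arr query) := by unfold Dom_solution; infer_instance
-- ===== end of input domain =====

-- B replaces A's stateful enumerate loop by a closed form (sum of the odd-index slice
-- query[1::2] plus a parity fix-up from the last one/two elements); same cost, simpler shape.

-- ===== PORT A =====
-- the loop body of A: state (s, e), item (index, value)
def solStepA (se : Int × Int) (iv : Int × Int) : Int × Int :=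
  if PySem.Int.mod iv.1 2 == 0 then (se.1, se.1 + iv.2) else (se.1 + iv.2, se.2)

def solution (arr : List Int) (query : List Int) : List Int :=
  let se := (PySem.List.enumerate query).foldl solStepA (0, 0)
  if se.1 ≠ se.2 then PySem.List.slice arr (some se.1) (some se.2) else [-1]

-- ===== PORT B =====
-- query[-1] / query[-2] are only read when in range (query nonempty / length ≥ 2), so pyGetD is exact
def solution_alt (arr : List Int) (query : List Int) : List Int :=
  if query = [] then [-1]
  else
    let s := ((PySem.List.slice? query (some 1) none 2).getD []).sum
    let e := if query.length % 2 = 1 then s + PySem.List.pyGetD query (-1) 0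
             else s - PySem.List.pyGetD query (-1) 0 + PySem.List.pyGetD query (-2) 0
    if s ≠ e then PySem.List.slice arr (some s) (some e) else [-1]

-- ===== PRECONDITION & SPEC =====
def Spec_solution (arr : List Int) (query : List Int) (out : List Int) : Prop := out = solution_alt arr query
instance (arr : List Int) (query : List Int) (out : List Int) : Decidable (Spec_solution arr query out) := by unfold Spec_solution; infer_instance

-- ===== CLAIM (what is proved, stated in full; the proofs are below) =====
def Claim_equal_solution : Prop := ∀ (arr : List Int) (query : List Int), Dom_solution arr query → Spec_solution arr query (solution arr query)

-- ===== LEMMAS AND PROOFS =====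

-- the odd-index elements of a list
def odds : List Int → List Int
  | [] => []
  | [_] => []
  | _ :: b :: t => b :: odds t

lemma filterMap_range_odds (xs : List Int) :
    (List.range (xs.length / 2)).filterMap (fun (k : Nat) => xs[(1 + 2 * (k : Int)).toNat]?) = odds xs := by
  induction xs using odds.induct with
  | case1 => simp [odds]
  | case2 a => simp [odds]
  | case3 a b t ih =>
    have hlen : (a :: b :: t).length / 2 = t.length / 2 + 1 := by
      simp only [List.length_cons]; omega
    rw [hlen, List.range_succ_eq_map, List.filterMap_cons, List.filterMap_map]
    have hfun : ((fun (k : Nat) => (a :: b :: t)[(1 + 2 * (k : Int)).toNat]?) ∘ Nat.succ)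
        = (fun (k : Nat) => t[(1 + 2 * (k : Int)).toNat]?) := by
      funext k
      have h2 : (1 + 2 * ((k+1 : Nat) : Int)).toNat = (1 + 2 * (k:Int)).toNat + 2 := by push_cast; omega
      simp only [Function.comp_apply]
      push_cast
      rw [show ((1:Int) + 2 * ((k:Int)+1)).toNat = (1 + 2 * (k:Int)).toNat + 2 by push_cast at h2 ⊢; omega]
      rfl
    rw [hfun, ih]
    norm_num [odds]

-- query[1::2] is exactly the odd-index elements
lemma slice?_one_none_two (xs : List Int) :
    PySem.List.slice? xs (some 1) none 2 = some (odds xs) := by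
  unfold PySem.List.slice? PySem.List.sliceIndices
  norm_num
  rcases xs with _ | ⟨a, t⟩
  · simp [odds]
  · rcases t with _ | ⟨b, t⟩
    · simp [odds]
    · have hmin : min (1:Int) ((a :: b :: t).length : Int) = 1 := by
        simp only [List.length_cons]; push_cast; omega
      rw [hmin]
      rw [if_pos (by simp only [List.length_cons]; omega : 1 < (a :: b :: t).length)]
      have hcnt : ((((a :: b :: t).length : Int) - 1 + 2 - 1) / 2).toNat = (a :: b :: t).length / 2 := by
        simp only [List.length_cons]; push_cast; omega
      rw [hcnt, filterMap_range_odds]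

lemma solStepA_even (se : Int × Int) (iv : Int × Int) (h : iv.1 % 2 = 0) :
    solStepA se iv = (se.1, se.1 + iv.2) := by
  simp [solStepA, PySem.Int.mod, Int.fmod_eq_emod, h]

lemma solStepA_odd (se : Int × Int) (iv : Int × Int) (h : iv.1 % 2 = 1) :
    solStepA se iv = (se.1 + iv.2, se.2) := by
  simp [solStepA, PySem.Int.mod, Int.fmod_eq_emod, h]

-- characterisation of A's fold, two elements at a time
lemma foldA_char : ∀ (q : List Int) (s0 e0 n : Int), n % 2 = 0 → q ≠ [] →
    (PySem.List.enumerate q n).foldl solStepA (s0, e0) =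
      (s0 + (odds q).sum,
       if q.length % 2 = 1 then s0 + (odds q).sum + q.getLastD 0
       else s0 + (odds q).sum - q.getLastD 0 + q.getD (q.length - 2) 0) := by
  intro q
  induction q using odds.induct with
  | case1 => intro _ _ _ _ h; exact absurd rfl h
  | case2 a =>
    intro s0 e0 n hn _
    rw [PySem.List.enumerate_cons, PySem.List.enumerate_nil]
    simp only [List.foldl_cons, List.foldl_nil]
    rw [solStepA_even _ _ hn]
    simp [odds]
  | case3 a b t ih =>
    intro s0 e0 n hn _
    rw [PySem.List.enumerate_cons, PySem.List.enumerate_cons]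
    simp only [List.foldl_cons]
    rw [solStepA_even (s0, e0) (n, a) hn, solStepA_odd _ (n + 1, b) (by simp; omega)]
    simp only []
    rcases eq_or_ne t [] with rfl | ht
    · rw [PySem.List.enumerate_nil]
      simp [odds]
    · rw [ih (s0 + b) (s0 + a) (n + 1 + 1) (by omega) ht]
      have hsum : (odds (a :: b :: t)).sum = b + (odds t).sum := by simp [odds]
      have hlast : (a :: b :: t).getLastD 0 = t.getLastD 0 := by
        rcases t with _ | ⟨c, t'⟩; · exact absurd rfl ht
        rfl
      have hlen : (a :: b :: t).length = t.length + 2 := by simp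
      rw [hsum, hlast, hlen]
      by_cases hp : t.length % 2 = 1
      · rw [if_pos (by omega : (t.length + 2) % 2 = 1), if_pos hp]
        simp only [Prod.mk.injEq]
        constructor <;> ring
      · have ht2 : 2 ≤ t.length := by
          rcases t with _ | ⟨c, t'⟩; · exact absurd rfl ht
          simp only [List.length_cons] at hp ⊢; omega
        obtain ⟨m, hm⟩ : ∃ m, t.length = m + 2 := ⟨t.length - 2, by omega⟩
        rw [if_neg (by omega : ¬ (t.length + 2) % 2 = 1), if_neg hp, hm]
        have hgd : (a :: b :: t).getD (m + 2 + 2 - 2) 0 = t.getD (m + 2 - 2) 0 := by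
          simp [List.getD]
        rw [hgd]
        simp only [Prod.mk.injEq]
        constructor <;> ring

lemma solution_eq_alt (arr query : List Int) : solution arr query = solution_alt arr query := by
  unfold solution solution_alt
  rcases eq_or_ne query [] with rfl | hq
  · simp [PySem.List.enumerate_nil]
  · rw [if_neg hq, slice?_one_none_two, foldA_char query 0 0 0 rfl hq]
    have h1 : PySem.List.pyGetD query (-1) 0 = query.getLastD 0 := by
      rw [PySem.List.pyGetD_neg_one query 0 hq, List.getLastD_eq_getLast?]
      rw [List.getLast?_eq_some_getLast hq]
      rfl
    rw [h1]
    simp only [Option.getD_some, zero_add]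
    by_cases hp : query.length % 2 = 1
    · rw [if_pos hp, if_pos hp]
    · have h2 : 2 ≤ query.length := by
        rcases query with _ | ⟨c, t⟩; · exact absurd rfl hq
        rcases t with _ | ⟨d, t'⟩; · simp at hp
        simp only [List.length_cons]; omega
      have h3 : PySem.List.pyGetD query (-2) 0 = query.getD (query.length - 2) 0 := by
        rw [PySem.List.pyGetD_neg_ofNat query 2 0 (by omega) h2]
        rw [List.getD_eq_getElem _ _ (by omega)]
      rw [if_neg hp, if_neg hp, h3]

-- ===== VERDICT (by name: the statement is the Claim_ definition above) =====
theorem solution_spec : Claim_equal_solution := by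
  intro arr query _
  exact solution_eq_alt arr query
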